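-- pv_equiv track=rewrite | github.com/adabbott/Research_Notes | symmetric_groups/induced_permutations.py | molecular_cycles
-- ===== SOURCE A (Python) =====
-- import itertools as it
-- import math
--
-- def generate_permutations(k):
--     """
--     Generates a list of lists of all possible orderings of k indices
--     """
--     f_k = math.factorial(k)
--     A = []
--     for perm in (it.permutations(range(k))):
--         A.append(list(perm))
--     return A
--
-- def find_cycles(perm):
--     """
--     Finds the cycle(s) required to get the permutation. For example,
--     the permutation [3,1,2] is obtained by permuting [1,2,3] with the cycle [1,2,3]
--     read as "1 goes to 2, 2 goes to 3, 3 goes to 1".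
--     Sometimes cycles are products of more than one subcycle, e.g. (12)(34)(5678)
--     This function is to find them all. Ripped bits and pieces of this off from SE,
--     don't completely understand it but it works :)
--     """
--     pi = {i: perm[i] for i in range(len(perm))}
--     cycles = []
--
--     while pi:
--         elem0 = next(iter(pi)) # arbitrary starting element
--         this_elem = pi[elem0]
--         next_item = pi[this_elem]
--
--         cycle = []
--         while True:
--             cycle.append(this_elem)
--             del pi[this_elem]
--             this_elem = next_item
--             if next_item in pi:
--                 next_item = pi[next_item]
--             else:
--                 break
--         cycles.append(cycle[::-1])
--
--     # only save cycles of size 2 and larger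
--     cycles[:] = [cyc for cyc in cycles if len(cyc) > 1]
--     return cycles
--
-- def molecular_cycles(atomtype_vector):
--     """
--     Finds the complete set of cycles that may act on a molecular system.
--     Given an atomtype vector, containing the number of each atom:
--          1.  generate the permutations of each atom
--          2.  generate the cycles of each atom
--          3.  adjust the indices to be nonoverlapping, so that each atom has a unique set of indices.
--     For example, For an A2BC system, the indices may be assigned as follows: A 0,1; B 2; C 3;
--     while the methods generate_permutations and find_cycles index from 0 for every atom, so we adjust the indices of every atom appropriately
--     """
--     permutations_by_atom = []
--     for atom in atomtype_vector:
--         # add the set of permutations for each atom type to permutations_by_atom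
--         permutations_by_atom.append(generate_permutations(atom)) # an array of permutations is added for atom type X
--     cycles_by_atom = []
--     # each atom has a set of permutations, saved in permutations_by_atom
--     for i, perms in enumerate(permutations_by_atom):
--         cycles = []
--         # find the cycles of each permutation and append to cycles, then append cycles to cycles_by_atom
--         for perm in perms:
--             cyc = find_cycles(perm)
--             if cyc:  # dont add empty cycles (identity permutation)
--                 cycles.append(cyc)
--         cycles_by_atom.append(cycles)
--     # now update the indices of the second atom through the last atom since they are currently indexed from zero
--     # to do this we need to know the number of previous atoms, num_prev_atoms
--     atomidx = 0
--     num_prev_atoms = 0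
--     for atom in cycles_by_atom[1:]:
--         num_prev_atoms += atomtype_vector[atomidx]
--         for cycle in atom:
--             for subcycle in cycle: # some cycles are composed of two or more subcycles (12)(34) etc.
--                 for i, idx in enumerate(subcycle):
--                     subcycle[i] = idx + num_prev_atoms
--         atomidx += 1
--     return cycles_by_atom
-- ===== SOURCE B (Python) =====
-- import itertools as it
--
--
-- def find_cycles(perm):
--     """Cycle decomposition with A's exact per-cycle element ordering."""
--     pi = {i: perm[i] for i in range(len(perm))}
--     cycles = []
--
--     while pi:
--         elem0 = next(iter(pi))
--         this_elem = pi[elem0]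
--         next_item = pi[this_elem]
--
--         cycle = []
--         while True:
--             cycle.append(this_elem)
--             del pi[this_elem]
--             this_elem = next_item
--             if next_item in pi:
--                 next_item = pi[next_item]
--             else:
--                 break
--         cycles.append(cycle[::-1])
--
--     cycles[:] = [cyc for cyc in cycles if len(cyc) > 1]
--     return cycles
--
--
-- def molecular_cycles(atomtype_vector):
--     """Single pass per atom: the index offset is carried as a running prefix
--     sum and applied to each cycle as it is produced, so no list of raw
--     permutations and no after-the-fact in-place adjustment loop is needed."""
--     cycles_by_atom = []
--     offset = 0
--     for k in atomtype_vector: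
--         cycles = []
--         for perm in it.permutations(range(k)):
--             cyc = find_cycles(list(perm))
--             if cyc:
--                 cycles.append([[idx + offset for idx in sub] for sub in cyc])
--         cycles_by_atom.append(cycles)
--         offset += k
--     return cycles_by_atom
-- ===== Notes on version B (the rewrite author's own statement) =====
-- stated objective: simpler
-- what changed: B replaces A's three phases (collect all permutation lists, collect all cycle decompositions, then mutate every index in place with a running offset loop) by a single pass per atom that carries the index offset as a running prefix sum and applies it to each cycle decomposition as it is produced.
import Mathlib
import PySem

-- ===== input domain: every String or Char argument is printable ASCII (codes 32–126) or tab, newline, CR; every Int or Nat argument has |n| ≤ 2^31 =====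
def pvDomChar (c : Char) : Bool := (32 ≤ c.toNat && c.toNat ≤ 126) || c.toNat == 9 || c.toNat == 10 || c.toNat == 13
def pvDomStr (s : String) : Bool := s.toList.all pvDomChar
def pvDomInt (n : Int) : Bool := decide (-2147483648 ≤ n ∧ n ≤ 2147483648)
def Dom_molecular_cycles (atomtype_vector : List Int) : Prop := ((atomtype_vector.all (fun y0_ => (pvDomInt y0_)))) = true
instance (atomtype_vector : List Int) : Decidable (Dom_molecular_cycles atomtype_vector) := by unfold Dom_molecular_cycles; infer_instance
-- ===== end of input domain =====

-- B applies the per-atom index offset inline as a running prefix sum in one pass,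
-- replacing A's build-all-then-mutate-in-place phases (objective: simpler).

-- ===== PORT A =====

-- find_cycles, shared module helper of both Source A and Source B (B keeps A's exact
-- cycle-finding behaviour): dict pi over 0..len(perm)-1, peel cycles off.
-- inner `while True` loop; fuel ≥ pi.size makes the recursion total (the loop
-- deletes one key per pass, so the fuel is never exhausted on a real run).
def fcInner : Nat → PySem.Dict Int Int → Int → Int → List Int →
    List Int × PySem.Dict Int Int
  | 0, pi, _, _, cycle => (cycle, pi)
  | fuel + 1, pi, this_elem, next_item, cycle =>
    let cycle := cycle ++ [this_elem]
    let pi := pi.erase this_elem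
    match pi.get? next_item with
    | some v => fcInner fuel pi next_item v cycle
    | none => (cycle, pi)

-- outer `while pi:` loop; one cycle is removed per pass, so fuel ≥ pi.size suffices.
-- On a non-permutation the Python would raise KeyError at pi[elem0]/pi[this_elem];
-- that branch is unreachable here (perms always come from it.permutations).
def fcOuter : Nat → PySem.Dict Int Int → List (List Int) → List (List Int)
  | 0, _, acc => acc
  | fuel + 1, pi, acc =>
    match pi.keys with
    | [] => acc
    | elem0 :: _ =>
      match pi.get? elem0 with
      | none => acc  -- unreachable (elem0 is a key)
      | some this_elem =>
        match pi.get? this_elem with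
        | none => acc  -- unreachable KeyError branch (pi maps a permutation)
        | some next_item =>
          let r := fcInner pi.size pi this_elem next_item []
          fcOuter fuel r.2 (acc ++ [r.1.reverse])

def findCycles (perm : List Int) : List (List Int) :=
  -- pi = {i: perm[i] for i in range(len(perm))}; indices are in range, pyGetD is exact
  let pi : PySem.Dict Int Int :=
    (PySem.List.pyRange 0 perm.length 1).foldl
      (fun d i => d.insert i (PySem.List.pyGetD perm i 0)) PySem.Dict.empty
  let cycles := fcOuter (pi.size + 1) pi []
  cycles.filter (fun cyc => 1 < cyc.length)

-- generate_permutations(k): it.permutations(range(k)) collected by append.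
-- (math.factorial(k) is computed and discarded; it raises for k < 0 — see Pre_.)
def generatePermutations (k : Int) : List (List Int) :=
  let r := PySem.List.pyRange 0 k 1
  (PySem.List.permutations r r.length).foldl (fun A perm => A ++ [perm]) []

-- the in-place index-adjustment loop over cycles_by_atom[1:], carrying atomidx
-- and num_prev_atoms; atomtype_vector[atomidx] is always in range on a real run
def adjustLoop (v : List Int) :
    List (List (List (List Int))) → Int → Int → List (List (List (List Int)))
  | [], _, _ => []
  | atom :: rest, atomidx, num_prev_atoms =>
    let num_prev_atoms := num_prev_atoms + PySem.List.pyGetD v atomidx 0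
    (atom.map fun cycle => cycle.map fun subcycle =>
        subcycle.map fun idx => idx + num_prev_atoms)
      :: adjustLoop v rest (atomidx + 1) num_prev_atoms

-- the inner `for perm in perms:` loop of A's phase 2
def atomLoop (perms : List (List Int)) : List (List (List Int)) :=
  perms.foldl
    (fun cycles perm =>
      let cyc := findCycles perm
      if cyc ≠ [] then cycles ++ [cyc] else cycles) []

def molecular_cycles (atomtype_vector : List Int) : List (List (List (List Int))) :=
  let permutations_by_atom :=
    atomtype_vector.foldl (fun acc atom => acc ++ [generatePermutations atom]) []
  let cycles_by_atom :=
    permutations_by_atom.foldl (fun acc perms => acc ++ [atomLoop perms]) []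
  match cycles_by_atom with
  | [] => []
  | first :: rest => first :: adjustLoop atomtype_vector rest 0 0

-- ===== PORT B =====
def molecular_cycles_alt (atomtype_vector : List Int) : List (List (List (List Int))) :=
  (atomtype_vector.foldl
    (fun (st : List (List (List (List Int))) × Int) k =>
      let r := PySem.List.pyRange 0 k 1
      let cycles :=
        (PySem.List.permutations r r.length).foldl
          (fun cs perm =>
            let cyc := findCycles perm
            if cyc ≠ [] then
              cs ++ [cyc.map fun sub => sub.map fun idx => idx + st.2]
            else cs) []
      (st.1 ++ [cycles], st.2 + k))
    ([], 0)).1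

-- ===== PRECONDITION & SPEC =====
-- Pre_ excludes exactly the inputs with a negative atom count, on which A raises
-- ValueError in math.factorial before producing anything.
def Pre_molecular_cycles (atomtype_vector : List Int) : Prop :=
  ∀ x ∈ atomtype_vector, 0 ≤ x
instance (atomtype_vector : List Int) : Decidable (Pre_molecular_cycles atomtype_vector) := by
  unfold Pre_molecular_cycles; infer_instance

def pvWitness_molecular_cycles : List Int := [2, 1]

def Spec_molecular_cycles (atomtype_vector : List Int) (out : List (List (List (List Int)))) : Prop := out = molecular_cycles_alt atomtype_vector
instance (atomtype_vector : List Int) (out : List (List (List (List Int)))) : Decidable (Spec_molecular_cycles atomtype_vector out) := by unfold Spec_molecular_cycles; infer_instance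

-- ===== CLAIM (what is proved, stated in full; the proofs are below) =====
def Claim_equal_molecular_cycles : Prop := ∀ (atomtype_vector : List Int), Dom_molecular_cycles atomtype_vector → Pre_molecular_cycles atomtype_vector → Spec_molecular_cycles atomtype_vector (molecular_cycles atomtype_vector)

-- ===== LEMMAS AND PROOFS =====

-- A's unadjusted cycle list for one atom of count k (phases 1–2 of A, fused)
def atomCycles (k : Int) : List (List (List Int)) :=
  ((generatePermutations k).filter (fun perm => findCycles perm ≠ [])).map findCycles

-- add offset `off` to every index of one atom's cycle list
def addOff (off : Int) (cycs : List (List (List Int))) : List (List (List Int)) :=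
  cycs.map fun cycle => cycle.map fun subcycle => subcycle.map fun idx => idx + off

-- B's per-atom loop, written as a recursion over the atom counts with the
-- running offset made explicit
def bGo (off : Int) : List Int → List (List (List (List Int)))
  | [] => []
  | k :: rest => addOff off (atomCycles k) :: bGo (off + k) rest

theorem foldl_cycles_eq (perms : List (List Int)) (g : List (List Int) → List (List Int))
    (acc : List (List (List Int)))  :
    perms.foldl
      (fun cycles perm =>
        let cyc := findCycles perm
        if cyc ≠ [] then cycles ++ [g cyc] else cycles) acc
      = acc ++ (perms.filter (fun perm => findCycles perm ≠ [])).map (fun perm => g (findCycles perm)) := by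
  have h := PySem.List.foldl_append_if (fun perm => decide (findCycles perm ≠ []))
      (fun perm => g (findCycles perm)) perms acc
  simpa using h

theorem genPerms_eq (k : Int) :
    generatePermutations k
      = PySem.List.permutations (PySem.List.pyRange 0 k 1) (PySem.List.pyRange 0 k 1).length := by
  unfold generatePermutations
  rw [PySem.List.foldl_append_singleton]
  rfl

theorem atomCycles_eq (k : Int) : atomLoop (generatePermutations k) = atomCycles k := by
  unfold atomLoop
  have h := foldl_cycles_eq (generatePermutations k) id []
  simp only [id] at h
  rw [h]
  simp [atomCycles]

theorem addOff_zero (c : List (List (List Int))) : addOff 0 c = c := by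
  simp [addOff]

theorem alt_foldl_eq (v : List Int) (acc : List (List (List (List Int)))) (off : Int) :
    (v.foldl
      (fun (st : List (List (List (List Int))) × Int) k =>
        let r := PySem.List.pyRange 0 k 1
        let cycles :=
          (PySem.List.permutations r r.length).foldl
            (fun cs perm =>
              let cyc := findCycles perm
              if cyc ≠ [] then
                cs ++ [cyc.map fun sub => sub.map fun idx => idx + st.2]
              else cs) []
        (st.1 ++ [cycles], st.2 + k)) (acc, off)).1 = acc ++ bGo off v := by
  induction v generalizing acc off with
  | nil => simp [bGo]
  | cons k rest ih =>
    have hstep :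
        ((PySem.List.permutations (PySem.List.pyRange 0 k 1)
            (PySem.List.pyRange 0 k 1).length).foldl
          (fun cs perm =>
            let cyc := findCycles perm
            if cyc ≠ [] then
              cs ++ [cyc.map fun sub => sub.map fun idx => idx + off]
            else cs) [])
          = addOff off (atomCycles k) := by
      rw [foldl_cycles_eq _ (fun cyc => cyc.map fun sub => sub.map fun idx => idx + off) []]
      simp [atomCycles, addOff, genPerms_eq, List.map_map, Function.comp_def]
    rw [List.foldl_cons]
    show (rest.foldl _ (acc ++ [_], off + k)).1 = _
    rw [ih, hstep, bGo]
    simp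

theorem adjustLoop_eq (v : List Int) (u : List Int) (i : Nat)
    (hdrop : v.drop (i + 1) = u) (prev : Int) :
    adjustLoop v (u.map atomCycles) (i : Int) prev
      = bGo (prev + PySem.List.pyGetD v (i : Int) 0) u := by
  induction u generalizing i prev with
  | nil => simp [adjustLoop, bGo]
  | cons a t ih =>
    have hlen : i + 1 < v.length := by
      by_contra h
      rw [List.drop_eq_nil_of_le (by omega)] at hdrop
      exact (List.cons_ne_nil a t) hdrop.symm
    have hcons : v[i+1] :: v.drop (i + 2) = a :: t := by
      rw [← List.drop_eq_getElem_cons hlen]; exact hdrop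
    have ha : v[i+1] = a := (List.cons_eq_cons.mp hcons).1
    have ht : v.drop (i + 2) = t := (List.cons_eq_cons.mp hcons).2
    have hget : PySem.List.pyGetD v ((i : Int) + 1) 0 = a := by
      have hc : ((i : Int) + 1) = ((i + 1 : Nat) : Int) := by push_cast; ring
      rw [hc, PySem.List.pyGetD_natCast, List.getD_eq_getElem?_getD,
        List.getElem?_eq_getElem hlen]
      simpa using ha
    simp only [List.map_cons, adjustLoop, bGo, List.cons.injEq]
    refine ⟨rfl, ?_⟩
    have hrec := ih (i + 1) (by simpa [Nat.add_assoc] using ht)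
      (prev + PySem.List.pyGetD v (i : Int) 0)
    have hc : ((i + 1 : Nat) : Int) = (i : Int) + 1 := by push_cast; ring
    rw [hc, hget] at hrec
    rw [hrec]

theorem ports_eq (v : List Int) : molecular_cycles v = molecular_cycles_alt v := by
  unfold molecular_cycles molecular_cycles_alt
  rw [alt_foldl_eq v [] 0]
  simp only [List.nil_append]
  rw [PySem.List.foldl_append_singleton_eq_map, PySem.List.foldl_append_singleton_eq_map]
  simp only [List.nil_append, List.map_map, Function.comp_def]
  rw [List.map_congr_left (fun k _ => atomCycles_eq k)]
  cases v with
  | nil => simp [bGo]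
  | cons k0 t =>
    simp only [List.map_cons, bGo, List.cons.injEq]
    refine ⟨(addOff_zero (atomCycles k0)).symm, ?_⟩
    have h := adjustLoop_eq (k0 :: t) t 0 (by simp) 0
    simpa [PySem.List.pyGetD] using h

-- ===== VERDICT (by name: the statement is the Claim_ definition above) =====
theorem molecular_cycles_spec : Claim_equal_molecular_cycles := by
  intro v _ _
  unfold Spec_molecular_cycles
  exact ports_eq v
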